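-- pv_equiv track=rewrite | github.com/FahimAlvi/Python-Dictionary-Chirps | Chirps and Profile.py | get_top_chirps
-- ===== SOURCE A (Python) =====
-- from typing import List, Dict, Tuple
--
-- def get_top_chirps(
--         profile_dictionary: Dict[int, Tuple[str, List[int], List[int]]],
--         chirp_dictionary: Dict[int, Tuple[int, str, List[str], List[int], List[int]]],
--         user_id: int) \
--         -> List[str]:
--     """
--     Returns a list of the most liked chirp for every user user_id follows.
--     See Page 3 Function 3 of th .pdf.
--     >>> profile_dictionary = create_profile_dictionary("profiles.txt")
--     >>> chirp_dictionary   = create_chirp_dictionary("chirps.txt")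
--     >>> get_top_chirps(profile_dictionary, chirp_dictionary, 300)
--     ["Actually nm. This isn't so bad lolz :P %StockholmeSyndrome"]
--     >>> get_top_chirps( profiles, chirps, 500 )
--     ['Make the ocean great again.',
--     'If some random dude offers to %ShowYouTheWorld do yourself a favour and %JustSayNo.',
--     'Does not want to build a %SnowMan %StopAsking']
--     """
--     if user_id not in profile_dictionary:
--         return []
--
--     user_data = profile_dictionary.get(user_id)
--     if not user_data:
--         return []
--
--     followed = map(int, user_data[2])
--     most_liked_chirps = list()
--
--     for f in followed:
--         all_chirps = dict()
--         for chirpID in chirp_dictionary: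
--             if chirp_dictionary[chirpID][0] == f:
--                 all_chirps[chirpID] = chirp_dictionary[chirpID]
--
--         most_likes = -1
--         temp_chirp = None
--
--         for cid in all_chirps:
--             if len(all_chirps[cid][3]) > most_likes:
--                 most_likes = len(all_chirps[cid][3])
--                 temp_chirp = all_chirps[cid][1]
--
--         if temp_chirp is not None:
--             most_liked_chirps.append(temp_chirp)
--
--     return most_liked_chirps
-- ===== SOURCE B (Python) =====
-- def get_top_chirps(profile_dictionary, chirp_dictionary, user_id):
--     user_data = profile_dictionary.get(user_id)
--     if not user_data:
--         return []
--     # One pass over the chirps: best (likes, text) per author, first maximum kept.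
--     best = {}
--     for author, text, _tags, likes, _seen in chirp_dictionary.values():
--         n = len(likes)
--         cur = best.get(author)
--         if cur is None or n > cur[0]:
--             best[author] = (n, text)
--     result = []
--     for f in map(int, user_data[2]):
--         if f in best:
--             result.append(best[f][1])
--     return result
-- ===== Notes on version B (the rewrite author's own statement) =====
-- stated objective: alternative
-- what changed: Replaces the per-followed-user rescan of the whole chirp dictionary (build a filtered dict, then argmax) by one indexing pass over all chirps that records the best (most-liked, first-wins) chirp per author, followed by a dictionary lookup per followed user.
import Mathlib
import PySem

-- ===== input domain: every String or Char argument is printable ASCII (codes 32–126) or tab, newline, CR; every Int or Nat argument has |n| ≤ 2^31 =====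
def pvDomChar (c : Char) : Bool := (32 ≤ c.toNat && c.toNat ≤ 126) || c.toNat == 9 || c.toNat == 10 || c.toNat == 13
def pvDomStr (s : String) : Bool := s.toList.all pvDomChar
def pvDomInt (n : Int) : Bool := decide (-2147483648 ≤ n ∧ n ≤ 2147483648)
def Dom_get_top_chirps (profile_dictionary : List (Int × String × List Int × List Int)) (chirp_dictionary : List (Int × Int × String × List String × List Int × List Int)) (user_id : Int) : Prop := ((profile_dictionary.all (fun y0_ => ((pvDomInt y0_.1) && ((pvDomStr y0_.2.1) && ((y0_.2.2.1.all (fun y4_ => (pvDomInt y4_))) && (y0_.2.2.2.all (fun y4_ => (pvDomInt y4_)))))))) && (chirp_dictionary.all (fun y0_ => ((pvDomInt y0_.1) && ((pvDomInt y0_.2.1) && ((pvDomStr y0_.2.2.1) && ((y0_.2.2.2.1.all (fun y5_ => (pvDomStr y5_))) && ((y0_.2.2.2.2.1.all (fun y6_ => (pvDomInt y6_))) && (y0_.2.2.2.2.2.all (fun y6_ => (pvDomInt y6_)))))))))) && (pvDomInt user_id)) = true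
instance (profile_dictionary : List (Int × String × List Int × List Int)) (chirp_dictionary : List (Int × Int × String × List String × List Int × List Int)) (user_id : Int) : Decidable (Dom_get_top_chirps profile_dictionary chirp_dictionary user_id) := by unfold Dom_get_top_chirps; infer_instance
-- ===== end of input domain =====

-- B replaces A's per-followed-user rescan of all chirps by one indexing pass (best chirp per
-- author) plus a dictionary lookup per followed user; same return value.

-- ===== PORT A =====
def get_top_chirps (profile_dictionary : List (Int × String × List Int × List Int)) (chirp_dictionary : List (Int × Int × String × List String × List Int × List Int)) (user_id : Int) : List String :=
  let pd : PySem.Dict Int (String × List Int × List Int) := PySem.Dict.ofList profile_dictionary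
  let cd : PySem.Dict Int (Int × String × List String × List Int × List Int) := PySem.Dict.ofList chirp_dictionary
  if pd.contains user_id = false then []
  else
    match pd.get? user_id with
    | none => []
    | some user_data =>
      -- `if not user_data:` never fires: user_data is a (non-empty, hence truthy) 3-tuple
      let followed := user_data.2.2   -- map(int, user_data[2]) is the identity on a list of ints
      followed.foldl (fun most_liked_chirps f =>
        -- all_chirps = the chirps of author f, rebuilt as a dict on every iteration
        let all_chirps : PySem.Dict Int (Int × String × List String × List Int × List Int) :=
          cd.items.foldl (fun d p => if p.2.1 == f then d.insert p.1 p.2 else d) PySem.Dict.empty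
        -- scan all_chirps with most_likes = -1, temp_chirp = None
        let st := all_chirps.items.foldl (fun (st : Int × Option String) p =>
            if (p.2.2.2.2.1.length : Int) > st.1 then ((p.2.2.2.2.1.length : Int), some p.2.2.1)
            else st) (-1, none)
        match st.2 with
        | some t => most_liked_chirps ++ [t]
        | none => most_liked_chirps) []

-- ===== PORT B =====
def get_top_chirps_alt (profile_dictionary : List (Int × String × List Int × List Int)) (chirp_dictionary : List (Int × Int × String × List String × List Int × List Int)) (user_id : Int) : List String :=
  match (PySem.Dict.ofList profile_dictionary).get? user_id with
  | none => []
  | some user_data =>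
    -- one pass: best (likes, text) per author, first maximum kept
    let best : PySem.Dict Int (Int × String) :=
      (PySem.Dict.ofList chirp_dictionary).values.foldl (fun b v =>
        match b.get? v.1 with
        | none => b.insert v.1 ((v.2.2.2.1.length : Int), v.2.1)
        | some cur =>
          if (v.2.2.2.1.length : Int) > cur.1 then b.insert v.1 ((v.2.2.2.1.length : Int), v.2.1)
          else b) PySem.Dict.empty
    user_data.2.2.foldl (fun result f =>
      match best.get? f with
      | some c => result ++ [c.2]
      | none => result) []

-- ===== PRECONDITION & SPEC =====
def Spec_get_top_chirps (profile_dictionary : List (Int × String × List Int × List Int)) (chirp_dictionary : List (Int × Int × String × List String × List Int × List Int)) (user_id : Int) (out : List String) : Prop := out = get_top_chirps_alt profile_dictionary chirp_dictionary user_id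
instance (profile_dictionary : List (Int × String × List Int × List Int)) (chirp_dictionary : List (Int × Int × String × List String × List Int × List Int)) (user_id : Int) (out : List String) : Decidable (Spec_get_top_chirps profile_dictionary chirp_dictionary user_id out) := by unfold Spec_get_top_chirps; infer_instance

-- ===== CLAIM (what is proved, stated in full; the proofs are below) =====
def Claim_equal_get_top_chirps : Prop := ∀ (profile_dictionary : List (Int × String × List Int × List Int)) (chirp_dictionary : List (Int × Int × String × List String × List Int × List Int)) (user_id : Int), Dom_get_top_chirps profile_dictionary chirp_dictionary user_id → Spec_get_top_chirps profile_dictionary chirp_dictionary user_id (get_top_chirps profile_dictionary chirp_dictionary user_id)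

-- ===== LEMMAS AND PROOFS =====

-- abbreviations used only by the proofs

-- the option-level "keep the first strict maximum" step both ports implement
def pvBestStep (o : Option (Int × String)) (v : Int × String × List String × List Int × List Int) :
    Option (Int × String) :=
  match o with
  | none => some ((v.2.2.2.1.length : Int), v.2.1)
  | some cur =>
    if (v.2.2.2.1.length : Int) > cur.1 then some ((v.2.2.2.1.length : Int), v.2.1) else cur

def pvPack (o : Option (Int × String)) : Int × Option String :=
  match o with
  | none => (-1, none)
  | some c => (c.1, some c.2)

-- A's inner scan (most_likes = -1 / temp_chirp = None) is pvBestStep through pvPack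
theorem pvScanA (l : List (Int × (Int × String × List String × List Int × List Int)))
    (o : Option (Int × String)) :
    l.foldl (fun (st : Int × Option String) p =>
        if (p.2.2.2.2.1.length : Int) > st.1 then ((p.2.2.2.2.1.length : Int), some p.2.2.1)
        else st) (pvPack o)
      = pvPack (l.foldl (fun o p => pvBestStep o p.2) o) := by
  induction l generalizing o with
  | nil => rfl
  | cons p l ih =>
    simp only [List.foldl_cons]
    rw [show (if (p.2.2.2.2.1.length : Int) > (pvPack o).1
          then ((p.2.2.2.2.1.length : Int), some p.2.2.1) else pvPack o)
        = pvPack (pvBestStep o p.2) from ?_, ih]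
    cases o with
    | none =>
      simp only [pvPack, pvBestStep]
      rw [if_pos]
      exact lt_of_lt_of_le (by norm_num) (Int.natCast_nonneg _)
    | some c =>
      simp only [pvPack, pvBestStep]
      split <;> rfl

-- A's filtered-dict construction: over nodup fresh keys it just collects the filtered items
theorem pvFilt (f : Int) (l : List (Int × (Int × String × List String × List Int × List Int)))
    (d : PySem.Dict Int (Int × String × List String × List Int × List Int))
    (hfresh : ∀ p ∈ l, d.contains p.1 = false) (hnd : (l.map (·.1)).Nodup) :
    (l.foldl (fun d p => if p.2.1 == f then d.insert p.1 p.2 else d) d).items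
      = d.items ++ l.filter (fun p => p.2.1 == f) := by
  induction l generalizing d with
  | nil => simp
  | cons p l ih =>
    simp only [List.map_cons, List.nodup_cons] at hnd
    by_cases hpf : p.2.1 == f
    · simp only [List.foldl_cons, List.filter_cons, hpf, if_true]
      rw [ih _ ?_ hnd.2, PySem.Dict.items_insert_of_not_contains _ _ (hfresh p (by simp))]
      · simp
      · intro q hq
        rw [PySem.Dict.contains_insert]
        have h1 : (q.1 == p.1) = false := by
          simp only [beq_eq_false_iff_ne]
          intro h; exact hnd.1 (h ▸ (List.mem_map_of_mem hq))
        simp [h1, hfresh q (List.mem_cons_of_mem _ hq)]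
    · simp only [List.foldl_cons, List.filter_cons, hpf, Bool.false_eq_true, if_false]
      exact ih _ (fun q hq => hfresh q (List.mem_cons_of_mem _ hq)) hnd.2

-- B's indexing pass, read at one author f, is pvBestStep over the chirps of f
theorem pvBuild (f : Int) (vs : List (Int × String × List String × List Int × List Int))
    (b : PySem.Dict Int (Int × String)) :
    (vs.foldl (fun b v =>
        match b.get? v.1 with
        | none => b.insert v.1 ((v.2.2.2.1.length : Int), v.2.1)
        | some cur =>
          if (v.2.2.2.1.length : Int) > cur.1 then b.insert v.1 ((v.2.2.2.1.length : Int), v.2.1)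
          else b) b).get? f
      = (vs.filter (fun v => v.1 == f)).foldl pvBestStep (b.get? f) := by
  induction vs generalizing b with
  | nil => rfl
  | cons v vs ih =>
    simp only [List.foldl_cons, List.filter_cons]
    by_cases hv : v.1 = f
    · subst hv
      simp only [beq_self_eq_true, if_pos, List.foldl_cons]
      rw [ih]
      congr 1
      cases hb : b.get? v.1 with
      | none => simp [pvBestStep, PySem.Dict.get?_insert_self]
      | some cur =>
        simp only [pvBestStep]
        split
        · simp [PySem.Dict.get?_insert_self]
        · simp [hb]
    · have hvf : (v.1 == f) = false := by simpa using hv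
      simp only [hvf, Bool.false_eq_true, if_false]
      rw [ih]
      congr 1
      cases hb : b.get? v.1 with
      | none => simp [PySem.Dict.get?_insert_of_ne _ _ (Ne.symm hv)]
      | some cur =>
        simp only [hb]
        split
        · simp [PySem.Dict.get?_insert_of_ne _ _ (Ne.symm hv)]
        · rfl

-- ===== VERDICT (by name: the statement is the Claim_ definition above) =====
theorem get_top_chirps_spec : Claim_equal_get_top_chirps := by
  intro profile_dictionary chirp_dictionary user_id _dom
  unfold Spec_get_top_chirps get_top_chirps get_top_chirps_alt
  simp only []
  set pd := PySem.Dict.ofList profile_dictionary with hpd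
  set cd := PySem.Dict.ofList chirp_dictionary with hcd
  cases hu : pd.get? user_id with
  | none =>
    have : pd.contains user_id = false := by
      rw [PySem.Dict.contains_eq_isSome_get?, hu]; rfl
    simp [this]
  | some user_data =>
    have hc : pd.contains user_id = true := by
      rw [PySem.Dict.contains_eq_isSome_get?, hu]; rfl
    simp only [hc, Bool.true_eq_false, if_false]
    have hkeys : (cd.items.map (·.1)).Nodup := by
      have := PySem.Dict.nodup_keys_ofList chirp_dictionary
      simpa [PySem.Dict.keys, hcd] using this
    apply PySem.List.foldl_congr_mem
    intro acc f _
    rw [pvFilt f cd.items PySem.Dict.empty (by simp) hkeys]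
    rw [show ((-1 : Int), (none : Option String)) = pvPack none from rfl, pvScanA]
    rw [pvBuild f cd.values PySem.Dict.empty]
    have hval : ((PySem.Dict.empty.items ++ cd.items.filter (fun (p : Int × Int × String × List String × List Int × List Int) => p.2.1 == f)).foldl
          (fun (o : Option (Int × String)) (p : Int × Int × String × List String × List Int × List Int) => pvBestStep o p.2) none)
        = (cd.values.filter (fun v => v.1 == f)).foldl pvBestStep (PySem.Dict.empty.get? f) := by
      rw [show (PySem.Dict.empty.items : List (Int × (Int × String × List String × List Int × List Int))) = [] from rfl,
        List.nil_append, PySem.Dict.get?_empty]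
      have hm : cd.values.filter (fun v => v.1 == f)
          = (cd.items.filter (fun p => p.2.1 == f)).map (·.2) := by
        show (cd.items.map (·.2)).filter (fun v => v.1 == f) = _
        rw [List.filter_map]
        rfl
      rw [hm, List.foldl_map]
    rw [hval]
    cases (cd.values.filter (fun v => v.1 == f)).foldl pvBestStep (PySem.Dict.empty.get? f) with
    | none => rfl
    | some c => rfl
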